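-- pv_equiv track=rewrite | github.com/GowthamSagar310/Competitive-Programming-Problems | 266B.py | solve
-- ===== SOURCE A (Python) =====
-- def solve(s, n, t):
--     for _ in range(t):
--         found = False
--         i = 0
--         while i < n-1:
--             if s[i] == "B" and s[i+1] == "G":
--                 found = True
--                 s[i], s[i+1] = s[i+1], s[i]
--                 i += 1
--             i += 1
--         if not found: break
--     return "".join(s)
-- ===== SOURCE B (Python) =====
-- def solve(s, n, t):
--     girls = []
--     walls = set()
--     for i, c in enumerate(s):
--         if c == "G":
--             girls.append(i)
--         elif c != "B":
--             walls.add(i)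
--     for _ in range(t):
--         moved = False
--         prev = -1
--         new = []
--         for p in girls:
--             if p < n and p - 1 > prev and p - 1 not in walls:
--                 new.append(p - 1)
--                 moved = True
--             else:
--                 new.append(p)
--             prev = p
--         girls = new
--         if not moved:
--             break
--     gs = set(girls)
--     return "".join(s[i] if i in walls else ("G" if i in gs else "B")
--                    for i in range(len(s)))
-- ===== Notes on version B (the rewrite author's own statement) =====
-- stated objective: alternative
-- what changed: B extracts the positions of the 'G' elements and of the static non-'B'/'G' cells once, advances only the girl positions per pass (a girl at p < n steps left when the cell before her is a free 'B'), and rebuilds the string in one final comprehension, instead of A's repeated in-place adjacent-swap rewriting of the whole list; Pre_ excludes n > len(s) with t >= 1 and n >= 2, where A's index scan runs past the end of the list and raises IndexError except for contents on which short-circuiting skips the out-of-range read.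
-- outside the precondition, e.g. on solve(['x'], 2, 1): A returns 'x', B returns 'x'; on solve(['G', 'x'], 3, 1): A returns 'Gx', B returns 'Gx'
import Mathlib
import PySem

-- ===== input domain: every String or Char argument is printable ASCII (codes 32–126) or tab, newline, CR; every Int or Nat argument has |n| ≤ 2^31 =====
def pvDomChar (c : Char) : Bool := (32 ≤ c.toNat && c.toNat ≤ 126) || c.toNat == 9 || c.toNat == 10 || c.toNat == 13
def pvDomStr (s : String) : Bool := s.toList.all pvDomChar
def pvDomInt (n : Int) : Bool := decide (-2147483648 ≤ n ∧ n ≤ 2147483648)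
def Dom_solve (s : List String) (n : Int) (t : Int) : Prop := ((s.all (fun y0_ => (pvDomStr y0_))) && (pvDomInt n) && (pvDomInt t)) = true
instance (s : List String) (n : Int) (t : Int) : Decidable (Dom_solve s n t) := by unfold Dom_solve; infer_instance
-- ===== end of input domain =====

-- B advances the girl positions (bounded by the line length n) against the static non-"B"/"G"
-- cells instead of A's repeated in-place rewriting of the whole list, reassembling the string
-- once at the end. A mutates its list argument in place (B does not); the equivalence proved
-- here is about the return value only.

-- ===== PORT A =====
-- inner while loop: state (s, i, found); fuel bounds the remaining iterations
def innerA (n : Int) : Nat → List String → Int → Bool → List String × Bool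
  | 0, s, _, found => (s, found)
  | f+1, s, i, found =>
    if i < n - 1 then
      if PySem.List.pyGetD s i "" = "B" ∧ PySem.List.pyGetD s (i+1) "" = "G" then
        let a := PySem.List.pyGetD s i ""
        let b := PySem.List.pyGetD s (i+1) ""
        innerA n f (PySem.List.pySetD (PySem.List.pySetD s i b) (i+1) a) (i+1+1) true
      else
        innerA n f s (i+1) found
    else (s, found)

-- for _ in range(t), with the 'if not found: break'
def outerA (n : Int) : Nat → List String → List String
  | 0, s => s
  | f+1, s =>
    let r := innerA n (n-1).toNat s 0 false
    if r.2 then outerA n f r.1 else r.1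

def solve (s : List String) (n : Int) (t : Int) : String :=
  PySem.Str.join "" (outerA n t.toNat s)

-- ===== PORT B =====
-- one pass over the girl positions: state (new, prev, moved) exactly as in Source B
def stepB (walls : PySem.Set Int) (n : Int) (girls : List Int) : List Int × Int × Bool :=
  girls.foldl (fun (acc : List Int × Int × Bool) p =>
    if p < n ∧ p - 1 > acc.2.1 ∧ ¬ (PySem.Set.contains walls (p - 1)) then (acc.1 ++ [p - 1], p, true)
    else (acc.1 ++ [p], p, acc.2.2)) ([], -1, false)

-- for _ in range(t) … if not moved: break
def loopB (walls : PySem.Set Int) (n : Int) : Nat → List Int → List Int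
  | 0, girls => girls
  | f+1, girls =>
    let r := stepB walls n girls
    if r.2.2 then loopB walls n f r.1 else r.1

def solve_alt (s : List String) (n : Int) (t : Int) : String :=
  let wg := (PySem.List.enumerate s 0).foldl
      (fun (acc : PySem.Set Int × List Int) ix =>
        if ix.2 = "G" then (acc.1, acc.2 ++ [ix.1])
        else if ix.2 ≠ "B" then (PySem.Set.add acc.1 ix.1, acc.2)
        else acc)
      (PySem.Set.empty, [])
  let girls := loopB wg.1 n t.toNat wg.2
  let gset := PySem.Set.ofList girls
  PySem.Str.join "" ((PySem.List.pyRange 0 (s.length : Int) 1).map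
      (fun i => if PySem.Set.contains wg.1 i then PySem.List.pyGetD s i ""
                else if PySem.Set.contains gset i then "G" else "B"))

-- ===== PRECONDITION & SPEC =====
-- Pre_ excludes n > len(s) (with t ≥ 1 and n ≥ 2), where A's index scan runs past the end of the
-- list and raises IndexError except for contents on which 'and'-short-circuiting happens to skip
-- the out-of-range read.
def Pre_solve (s : List String) (n : Int) (t : Int) : Prop :=
  n ≤ (s.length : Int) ∨ t ≤ 0 ∨ n ≤ 1
instance (s : List String) (n : Int) (t : Int) : Decidable (Pre_solve s n t) := by
  unfold Pre_solve; infer_instance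
def pvWitness_solve : List String × Int × Int := (["B", "G"], 2, 1)

def Spec_solve (s : List String) (n : Int) (t : Int) (out : String) : Prop := out = solve_alt s n t
instance (s : List String) (n : Int) (t : Int) (out : String) : Decidable (Spec_solve s n t out) := by unfold Spec_solve; infer_instance

-- ===== CLAIM (what is proved, stated in full; the proofs are below) =====
def Claim_equal_solve : Prop := ∀ (s : List String) (n : Int) (t : Int), Dom_solve s n t → Pre_solve s n t → Spec_solve s n t (solve s n t)

-- ===== LEMMAS AND PROOFS =====

-- one simultaneous pass of BG→GB rewriting, structurally
def pstep : List String → List String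
  | x :: y :: r => if x = "B" ∧ y = "G" then "G" :: "B" :: pstep r else x :: pstep (y :: r)
  | l => l

-- whether a pass performs at least one swap (A's 'found')
def hasBG : List String → Bool
  | x :: y :: r => if x = "B" ∧ y = "G" then true else hasBG (y :: r)
  | _ => false

-- A's outer loop, structurally
def iterA : Nat → List String → List String
  | 0, u => u
  | f+1, u => if hasBG u then iterA f (pstep u) else pstep u

-- girl positions of a region whose first cell sits at absolute position k
def girlsOf : Int → List String → List Int
  | _, [] => []
  | k, x :: r => (if x = "G" then [k] else []) ++ girlsOf (k+1) r

-- (position, value) pairs of the static non-"B"/"G" cells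
def wallsV : Int → List String → List (Int × String)
  | _, [] => []
  | k, x :: r => (if x ≠ "G" ∧ x ≠ "B" then [(k, x)] else []) ++ wallsV (k+1) r

-- structural form of stepB's fold
def stepS (walls : List Int) (n : Int) : Int → List Int → List Int × Bool
  | _, [] => ([], false)
  | prev, p :: ps =>
    let r := stepS walls n p ps
    if p < n ∧ p - 1 > prev ∧ ¬ (PySem.Set.contains walls (p-1)) then ((p - 1) :: r.1, true)
    else (p :: r.1, r.2)

theorem length_pstep (u : List String) : (pstep u).length = u.length := by
  fun_induction pstep u <;> simp_all

theorem mem_girlsOf (u : List String) : ∀ (k i : Int),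
    i ∈ girlsOf k u ↔ ∃ (j : Nat), ∃ _ : j < u.length, i = k + j ∧ u[j]! = "G" := by
  induction u with
  | nil => simp [girlsOf]
  | cons x r ih =>
    intro k i
    simp only [girlsOf, List.mem_append]
    constructor
    · rintro (h | h)
      · refine ⟨0, by simp, ?_, ?_⟩
        · split at h <;> simp_all
        · split at h <;> simp_all
      · obtain ⟨j, hj, hi, hv⟩ := (ih (k+1) i).1 h
        exact ⟨j+1, by simpa using hj, by push_cast; omega, by simpa using hv⟩
    · rintro ⟨j, hj, hi, hv⟩
      match j with
      | 0 => left; simp_all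
      | j+1 =>
        right
        exact (ih (k+1) i).2 ⟨j, by simpa using hj, by push_cast at hi ⊢; omega, by simpa using hv⟩

theorem mem_wallsV (u : List String) : ∀ (k i : Int) (v : String),
    (i, v) ∈ wallsV k u ↔ ∃ (j : Nat), ∃ _ : j < u.length,
      i = k + j ∧ v = u[j]! ∧ u[j]! ≠ "G" ∧ u[j]! ≠ "B" := by
  induction u with
  | nil => simp [wallsV]
  | cons x r ih =>
    intro k i v
    simp only [wallsV, List.mem_append]
    constructor
    · rintro (h | h)
      · refine ⟨0, by simp, ?_⟩
        split at h <;> simp_all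
      · obtain ⟨j, hj, hi, hv⟩ := (ih (k+1) i v).1 h
        exact ⟨j+1, by simpa using hj, by push_cast; omega, by simpa using hv⟩
    · rintro ⟨j, hj, hi, hv⟩
      match j with
      | 0 => left; simp_all
      | j+1 =>
        right
        refine (ih (k+1) i v).2 ⟨j, by simpa using hj, by push_cast at hi ⊢; omega, by simpa using hv⟩

theorem wallsV_pstep (u : List String) : ∀ (k : Int), wallsV k (pstep u) = wallsV k u := by
  fun_induction pstep u with
  | case1 x y r hc ih =>
    intro k
    obtain ⟨hx, hy⟩ := hc
    subst hx hy
    simp [wallsV, ih, add_assoc]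
  | case2 x y r hc ih =>
    intro k
    simp [wallsV, ih]
  | case3 l h1 => intro k; rfl

theorem wallsV_ge (u : List String) : ∀ (k : Int) (p : Int × String), p ∈ wallsV k u → k ≤ p.1 := by
  induction u with
  | nil => simp [wallsV]
  | cons x r ih =>
    intro k p hp
    simp only [wallsV, List.mem_append] at hp
    rcases hp with h | h
    · split at h <;> simp_all
    · have := ih (k+1) p h; omega

theorem girlsOf_ge (u : List String) : ∀ (k p : Int), p ∈ girlsOf k u → k ≤ p := by
  induction u with
  | nil => simp [girlsOf]
  | cons x r ih =>
    intro k p hp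
    simp only [girlsOf, List.mem_append] at hp
    rcases hp with h | h
    · split at h <;> simp_all
    · have := ih (k+1) p h; omega

theorem girlsOf_append (u v : List String) : ∀ (k : Int),
    girlsOf k (u ++ v) = girlsOf k u ++ girlsOf (k + (u.length : Int)) v := by
  induction u with
  | nil => intro k; simp [girlsOf]
  | cons x r ih =>
    intro k
    have harith : (k + 1) + (r.length : Int) = k + ((x :: r).length : Int) := by
      push_cast [List.length_cons]; ring
    simp only [List.cons_append, girlsOf, ih (k+1), harith, List.append_assoc]

theorem wallsV_append (u v : List String) : ∀ (k : Int),
    wallsV k (u ++ v) = wallsV k u ++ wallsV (k + (u.length : Int)) v := by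
  induction u with
  | nil => intro k; simp [wallsV]
  | cons x r ih =>
    intro k
    have harith : (k + 1) + (r.length : Int) = k + ((x :: r).length : Int) := by
      push_cast [List.length_cons]; ring
    simp only [List.cons_append, wallsV, ih (k+1), harith, List.append_assoc]

theorem stepB_fold_gen (walls : List Int) (n : Int) (girls : List Int) :
    ∀ (accL : List Int) (prev : Int) (accM : Bool),
    girls.foldl (fun (acc : List Int × Int × Bool) p =>
      if p < n ∧ p - 1 > acc.2.1 ∧ ¬ (PySem.Set.contains walls (p - 1)) then (acc.1 ++ [p - 1], p, true)
      else (acc.1 ++ [p], p, acc.2.2)) (accL, prev, accM)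
    = (accL ++ (stepS walls n prev girls).1, girls.getLast?.getD prev, accM || (stepS walls n prev girls).2) := by
  induction girls with
  | nil => simp [stepS]
  | cons p ps ih =>
    intro accL prev accM
    simp only [List.foldl_cons, stepS]
    have hlast : ps.getLast?.getD p = (p :: ps).getLast?.getD prev := by
      cases h : ps.getLast? <;> simp_all [List.getLast?_cons]
    by_cases hc : p < n ∧ p - 1 > prev ∧ ¬ (PySem.Set.contains walls (p-1)) = true
    · simp only [if_pos hc, ih]
      simpa using hlast
    · simp only [if_neg hc, ih]
      simpa using hlast

theorem stepB_eq_stepS (walls : List Int) (n : Int) (girls : List Int) :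
    stepB walls n girls = ((stepS walls n (-1) girls).1, girls.getLast?.getD (-1), (stepS walls n (-1) girls).2) := by
  have h := stepB_fold_gen walls n girls [] (-1) false
  unfold stepB
  rw [h]
  simp

theorem stepS_fix (walls : List Int) (n : Int) (g : List Int) (h : ∀ p ∈ g, ¬ p < n) :
    ∀ (prev : Int), stepS walls n prev g = (g, false) := by
  induction g with
  | nil => intro prev; rfl
  | cons p ps ih =>
    intro prev
    simp only [stepS]
    rw [if_neg (fun hc => h p (by simp) hc.1)]
    rw [ih (fun q hq => h q (by simp [hq]))]

theorem stepS_append (walls : List Int) (n : Int) (g2 : List Int)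
    (h2 : ∀ p ∈ g2, ¬ p < n) (g1 : List Int) : ∀ (prev : Int),
    stepS walls n prev (g1 ++ g2)
      = ((stepS walls n prev g1).1 ++ g2, (stepS walls n prev g1).2) := by
  induction g1 with
  | nil => intro prev; simp [stepS, stepS_fix walls n g2 h2]
  | cons p ps ih =>
    intro prev
    simp only [List.cons_append, stepS, ih]
    split_ifs <;> simp

theorem loopB_fix (walls : List Int) (n : Int) (g : List Int)
    (h : ∀ p ∈ g, ¬ p < n) : ∀ (f : Nat), loopB walls n f g = g := by
  intro f
  cases f with
  | zero => rfl
  | succ f =>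
    simp only [loopB, stepB_eq_stepS, stepS_fix walls n g h]
    simp

theorem build_spec (u : List String) : ∀ (k : Int) (accW accG : List Int),
    (∀ w ∈ accW, w < k) →
    (PySem.List.enumerate u k).foldl
      (fun (acc : PySem.Set Int × List Int) ix =>
        if ix.2 = "G" then (acc.1, acc.2 ++ [ix.1])
        else if ix.2 ≠ "B" then (PySem.Set.add acc.1 ix.1, acc.2)
        else acc) (accW, accG)
      = (accW ++ (wallsV k u).map Prod.fst, accG ++ girlsOf k u) := by
  induction u with
  | nil => intro k accW accG _; simp [wallsV, girlsOf, PySem.List.enumerate_nil]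
  | cons x r ih =>
    intro k accW accG hb
    rw [PySem.List.enumerate_cons]
    simp only [List.foldl_cons]
    by_cases hg : x = "G"
    · rw [if_pos hg, ih (k+1) accW (accG ++ [k]) (by intro w hw; have := hb w hw; omega)]
      simp [wallsV, girlsOf, hg]
    · rw [if_neg hg]
      by_cases hbb : x ≠ "B"
      · rw [if_pos hbb]
        have hadd : PySem.Set.add accW k = accW ++ [k] := by
          have hnm : k ∉ accW := fun hmem => by have := hb k hmem; omega
          simp [PySem.Set.add, PySem.Set.contains_eq_listContains, hnm]
        rw [hadd, ih (k+1) (accW ++ [k]) accG ?_]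
        · simp [wallsV, girlsOf, hg, hbb]
        · intro w hw
          rcases List.mem_append.1 hw with h | h
          · have := hb w h; omega
          · simp at h; omega
      · rw [if_neg hbb]
        rw [ih (k+1) accW accG (by intro w hw; have := hb w hw; omega)]
        simp at hbb
        simp [wallsV, girlsOf, hbb]

theorem contains_iff_mem (walls : List Int) (j : Int) :
    PySem.Set.contains walls j = true ↔ j ∈ walls := by
  simp [PySem.Set.contains_eq_listContains]

theorem master (walls : List Int) (n : Int) : ∀ (u : List String) (k prev : Int),
    prev < k →
    k + (u.length : Int) ≤ n →
    (∀ (j : Int), k ≤ j → j < k + (u.length : Int) → (j ∈ walls ↔ j ∈ (wallsV k u).map Prod.fst)) →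
    (u.head? = some "G" → ¬ (prev < k - 1 ∧ (k-1) ∉ walls)) →
    stepS walls n prev (girlsOf k u) = (girlsOf k (pstep u), hasBG u) := by
  intro u
  fun_induction pstep u with
  | case1 x y r hc ih =>
    intro k prev hp hn hw hhd
    obtain ⟨hx, hy⟩ := hc
    subst hx hy
    have hlen : (("B" :: "G" :: r : List String).length : Int) = (r.length : Int) + 2 := by
      push_cast [List.length_cons]; ring
    rw [hlen] at hn hw
    have hwv : wallsV k ("B" :: "G" :: r) = wallsV (k+1+1) r := by simp [wallsV]
    rw [hwv] at hw
    have hwr : ∀ (j : Int), k + 1 + 1 ≤ j → j < (k+1+1) + (r.length : Int) → (j ∈ walls ↔ j ∈ (wallsV (k+1+1) r).map Prod.fst) :=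
      fun j hj1 hj2 => hw j (by omega) (by omega)
    have hknw : k ∉ walls := by
      intro hk
      rcases List.mem_map.1 ((hw k le_rfl (by have := Int.natCast_nonneg r.length; omega)).1 hk) with ⟨p, hp', hfst⟩
      have := wallsV_ge _ _ _ hp'
      omega
    have hrec := ih (k+1+1) (k+1) (by omega) (by omega) hwr (by intro _; omega)
    have hg1 : girlsOf k ("B" :: "G" :: r) = (k+1) :: girlsOf (k+1+1) r := by
      simp [girlsOf]
    have hg2 : girlsOf k ("G" :: "B" :: pstep r) = k :: girlsOf (k+1+1) (pstep r) := by
      simp [girlsOf]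
    have hb1 : hasBG ("B" :: "G" :: r) = true := by simp [hasBG]
    rw [hg1, hg2, hb1]
    simp only [stepS, hrec]
    have hcond : (k + 1 < n ∧ k + 1 - 1 > prev ∧ ¬ (PySem.Set.contains walls (k+1-1)) = true) := by
      refine ⟨by have := Int.natCast_nonneg r.length; omega, by omega, ?_⟩
      simp only [contains_iff_mem]
      simpa using hknw
    rw [if_pos hcond]
    norm_num
  | case2 x y r hc ih =>
    intro k prev hp hn hw hhd
    have hlen2 : ((x :: y :: r : List String).length : Int) = (r.length : Int) + 2 := by
      push_cast [List.length_cons]; ring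
    rw [hlen2] at hn hw
    by_cases hxg : x = "G"
    · subst hxg
      have hwv : wallsV k ("G" :: y :: r) = wallsV (k+1) (y :: r) := by simp [wallsV]
      rw [hwv] at hw
      have hrec := ih (k+1) k (by omega) (by push_cast [List.length_cons]; omega)
        (fun j hj1 hj2 => hw j (by omega) (by push_cast [List.length_cons] at hj2; omega)) (by intro _; omega)
      have hg1 : girlsOf k ("G" :: y :: r) = k :: girlsOf (k+1) (y :: r) := by
        simp [girlsOf]
      have hg2 : girlsOf k ("G" :: pstep (y :: r)) = k :: girlsOf (k+1) (pstep (y :: r)) := by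
        simp [girlsOf]
      have hb1 : hasBG ("G" :: y :: r) = hasBG (y :: r) := by simp [hasBG]
      rw [hg1, hg2, hb1]
      simp only [stepS]
      have hcond : ¬ (k < n ∧ k - 1 > prev ∧ ¬ (PySem.Set.contains walls (k-1)) = true) := by
        have h2 := hhd rfl
        rw [contains_iff_mem]
        by_cases hm : (k-1) ∈ walls
        · simp [hm]
        · intro hcon; exact h2 ⟨by omega, hm⟩
      rw [if_neg hcond]
      simp [hrec]
    · -- x is not a girl: either a boy or a wall
      have hxw : x ≠ "B" → k ∈ walls := by
        intro hxb
        refine (hw k le_rfl (by have := Int.natCast_nonneg r.length; omega)).2 ?_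
        simp [wallsV, hxg, hxb]
      have hwr : ∀ (j : Int), k + 1 ≤ j → j < (k+1) + ((y :: r : List String).length : Int) → (j ∈ walls ↔ j ∈ (wallsV (k+1) (y :: r)).map Prod.fst) := by
        intro j hj1 hj2
        push_cast [List.length_cons] at hj2
        rw [hw j (by omega) (by omega)]
        by_cases hxw' : x ≠ "G" ∧ x ≠ "B"
        · rw [show wallsV k (x :: y :: r) = (k, x) :: wallsV (k+1) (y :: r) from by
            simp [wallsV, hxw']]
          simp only [List.map_cons, List.mem_cons]
          constructor
          · rintro (h | h)
            · omega
            · exact h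
          · intro h; right; exact h
        · rw [show wallsV k (x :: y :: r) = wallsV (k+1) (y :: r) from by
            simp only [wallsV, if_neg hxw']; simp]
      have hhd' : (y :: r).head? = some "G" → ¬ (prev < k + 1 - 1 ∧ (k+1-1) ∉ walls) := by
        intro hy
        simp only [List.head?_cons, Option.some.injEq] at hy
        have hxb : x ≠ "B" := fun hxb => hc ⟨hxb, hy⟩
        have hkw := hxw hxb
        intro hcon
        exact hcon.2 (by simpa using hkw)
      have hrec := ih (k+1) prev (by omega) (by push_cast [List.length_cons]; omega) hwr hhd'
      have hg1 : girlsOf k (x :: y :: r) = girlsOf (k+1) (y :: r) := by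
        simp [girlsOf, hxg]
      have hg2 : girlsOf k (x :: pstep (y :: r)) = girlsOf (k+1) (pstep (y :: r)) := by
        simp [girlsOf, hxg]
      have hb1 : hasBG (x :: y :: r) = hasBG (y :: r) := by
        simp only [hasBG]
        rw [if_neg hc]
      rw [hg1, hg2, hb1, hrec]
  | case3 l h1 =>
    intro k prev hp hn hw hhd
    match l, h1, hn with
    | x :: y :: r, h1, _ => exact (h1 x y r rfl).elim
    | [], _, _ => simp [girlsOf, stepS, hasBG]
    | [x], h1, hn =>
      by_cases hxg : x = "G"
      · subst hxg
        have hg1 : girlsOf k ["G"] = [k] := by simp [girlsOf]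
        have hb1 : hasBG ["G"] = false := rfl
        rw [hg1, hb1]
        simp only [stepS]
        have hcond : ¬ (k < n ∧ k - 1 > prev ∧ ¬ (PySem.Set.contains walls (k-1)) = true) := by
          have h2 := hhd rfl
          rw [contains_iff_mem]
          by_cases hm : (k-1) ∈ walls
          · simp [hm]
          · intro hcon; exact h2 ⟨by omega, hm⟩
        rw [if_neg hcond]
      · have hg1 : girlsOf k [x] = [] := by simp [girlsOf, hxg]
        have hb1 : hasBG [x] = false := rfl
        rw [hg1, hb1]
        simp [stepS]

theorem out_eq (u v : List String) (g : List Int)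
    (hlen : v.length = u.length)
    (hw : wallsV 0 v = wallsV 0 u)
    (hg : g = girlsOf 0 v) :
    (PySem.List.pyRange 0 (u.length : Int) 1).map
      (fun i => if PySem.Set.contains ((wallsV 0 u).map Prod.fst) i then PySem.List.pyGetD u i ""
                else if PySem.Set.contains (PySem.Set.ofList g) i then "G" else "B") = v := by
  rw [PySem.List.pyRange_zero_natCast, List.map_map]
  apply List.ext_getElem
  · simp [hlen]
  · intro j hj1 hj2
    have hju : j < u.length := by simpa using hj1
    have hjv : j < v.length := by omega
    simp only [List.getElem_map, List.getElem_range, Function.comp_apply]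
    have hgetD : PySem.List.pyGetD u ((j : Nat) : Int) "" = u[j] := by
      rw [PySem.List.pyGetD_natCast]
      exact List.getD_eq_getElem u "" hju
    by_cases hwall : u[j] ≠ "G" ∧ u[j] ≠ "B"
    · -- wall cell: value copied from u, and equals v's cell
      have hmemu : ((j : Int), u[j]) ∈ wallsV 0 u := by
        rw [mem_wallsV]
        exact ⟨j, hju, by simp, by simp [getElem!_pos u j hju, hwall.1, hwall.2]⟩
      have hcw : PySem.Set.contains ((wallsV 0 u).map Prod.fst) ((j : Nat) : Int) = true := by
        simp only [PySem.Set.contains_eq_listContains, List.contains_eq_mem, decide_eq_true_eq]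
        exact List.mem_map.2 ⟨_, hmemu, rfl⟩
      rw [if_pos hcw, hgetD]
      have hmemv : ((j : Int), u[j]) ∈ wallsV 0 v := by rw [hw]; exact hmemu
      rw [mem_wallsV] at hmemv
      obtain ⟨j', hj', heq, hval, _⟩ := hmemv
      have : j' = j := by omega
      subst this
      rw [hval, getElem!_pos v j' hjv]
    · -- u's cell is "B" or "G": not a wall position
      have hcw : ¬ (PySem.Set.contains ((wallsV 0 u).map Prod.fst) ((j : Nat) : Int) = true) := by
        simp only [PySem.Set.contains_eq_listContains, List.contains_eq_mem, decide_eq_true_eq]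
        intro hmem
        rcases List.mem_map.1 hmem with ⟨⟨i, val⟩, hp, hfst⟩
        simp only at hfst
        subst hfst
        rw [mem_wallsV] at hp
        obtain ⟨j', hj', hji, hval, hgg, hbb⟩ := hp
        have : j' = j := by omega
        subst this
        rw [getElem!_pos u j' hju] at hgg hbb
        tauto
      rw [if_neg hcw]
      by_cases hgirl : v[j] = "G"
      · have hgmem : ((j : Nat) : Int) ∈ g := by
          rw [hg, mem_girlsOf]
          exact ⟨j, hjv, by simp, by simp [getElem!_pos v j hjv, hgirl]⟩
        rw [if_pos (by simp only [PySem.Set.contains_eq_listContains, List.contains_eq_mem,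
              decide_eq_true_eq, PySem.Set.mem_ofList]; exact hgmem), hgirl]
      · have hgmem : ((j : Nat) : Int) ∉ g := by
          rw [hg, mem_girlsOf]
          rintro ⟨j', hj', hji, hval⟩
          have : j' = j := by omega
          subst this
          rw [getElem!_pos v j' hjv] at hval
          exact hgirl hval
        rw [if_neg (by simp only [PySem.Set.contains_eq_listContains, List.contains_eq_mem,
              decide_eq_true_eq, PySem.Set.mem_ofList]; exact hgmem)]
        -- v[j] is not a girl and not a wall, so it is "B"
        by_cases hvw : v[j] ≠ "G" ∧ v[j] ≠ "B"
        · exfalso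
          have hmemv : ((j : Int), v[j]) ∈ wallsV 0 v := by
            rw [mem_wallsV]
            exact ⟨j, hjv, by simp, by simp [getElem!_pos v j hjv, hvw.1, hvw.2]⟩
          rw [hw, mem_wallsV] at hmemv
          obtain ⟨j', hj', hji, hval, hgg, hbb⟩ := hmemv
          have : j' = j := by omega
          subst this
          rw [getElem!_pos u j' hju] at hgg hbb
          tauto
        · rw [not_and_or] at hvw
          rcases hvw with h1 | h1
          · exact absurd (not_not.1 h1) hgirl
          · exact (not_not.1 h1).symm

theorem build_spec' (u : List String) (k : Int) :
    (PySem.List.enumerate u k).foldl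
      (fun (acc : PySem.Set Int × List Int) ix =>
        if ix.2 = "G" then (acc.1, acc.2 ++ [ix.1])
        else if ix.2 ≠ "B" then (PySem.Set.add acc.1 ix.1, acc.2)
        else acc) (PySem.Set.empty, [])
      = ((wallsV k u).map Prod.fst, girlsOf k u) := by
  have h := build_spec u k [] [] (by simp)
  simpa using h

theorem pyGetD_append_len (pre l : List String) (x : String) (d : String) :
    PySem.List.pyGetD (pre ++ x :: l) (pre.length : Int) d = x := by
  rw [PySem.List.pyGetD_natCast]
  simp [List.getD_eq_getElem?_getD]

theorem pyGetD_append_len1 (pre l : List String) (x y : String) (d : String) :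
    PySem.List.pyGetD (pre ++ x :: y :: l) ((pre.length : Int) + 1) d = y := by
  have : ((pre.length : Int) + 1) = (((pre ++ [x]).length : Nat) : Int) := by simp
  rw [this, show pre ++ x :: y :: l = (pre ++ [x]) ++ y :: l from by simp]
  exact pyGetD_append_len _ _ _ _

theorem pySetD_append_len (pre l : List String) (x v : String) :
    PySem.List.pySetD (pre ++ x :: l) (pre.length : Int) v = pre ++ v :: l := by
  rw [PySem.List.pySetD_natCast]
  simp

theorem pySetD_append_len1 (pre l : List String) (x y v : String) :
    PySem.List.pySetD (pre ++ x :: y :: l) ((pre.length : Int) + 1) v = pre ++ x :: v :: l := by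
  have h : ((pre.length : Int) + 1) = (((pre ++ [x]).length : Nat) : Int) := by simp
  rw [h, show pre ++ x :: y :: l = (pre ++ [x]) ++ y :: l from by simp,
      pySetD_append_len, show (pre ++ [x]) ++ v :: l = pre ++ x :: v :: l from by simp]

theorem innerA_spec : ∀ (f : Nat) (w pre post : List String) (found : Bool) (n : Int),
    n = ((pre.length + w.length : Nat) : Int) → w.length ≤ f + 1 →
    innerA n f (pre ++ w ++ post) (pre.length : Int) found
      = (pre ++ pstep w ++ post, found || hasBG w) := by
  intro f
  induction f with
  | zero =>
    intro w pre post found n hn hf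
    interval_cases hwl : w.length
    · match w, hwl with
      | [], _ => simp [innerA, pstep, hasBG]
    · match w, hwl with
      | [x], _ => simp [innerA, pstep, hasBG]
  | succ f ih =>
    intro w pre post found n hn hf
    match w, hn, hf with
    | [], hn, hf =>
      simp only [innerA]
      rw [if_neg (by simp at hn; omega)]
      simp [pstep, hasBG]
    | [x], hn, hf =>
      simp only [innerA]
      rw [if_neg (by simp at hn; omega)]
      simp [pstep, hasBG]
    | x :: y :: r, hn, hf =>
      simp only [innerA]
      rw [if_pos (by push_cast at hn ⊢; simp at hn; omega)]
      have hg1 : PySem.List.pyGetD (pre ++ (x :: y :: r) ++ post) (pre.length : Int) "" = x := by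
        rw [show pre ++ (x :: y :: r) ++ post = pre ++ x :: (y :: r ++ post) from by simp]
        exact pyGetD_append_len _ _ _ _
      have hg2 : PySem.List.pyGetD (pre ++ (x :: y :: r) ++ post) ((pre.length : Int) + 1) "" = y := by
        rw [show pre ++ (x :: y :: r) ++ post = pre ++ x :: y :: (r ++ post) from by simp]
        exact pyGetD_append_len1 _ _ _ _ _
      by_cases hc : x = "B" ∧ y = "G"
      · rw [if_pos (by rw [hg1, hg2]; exact hc)]
        rw [hg1, hg2]
        have hs1 : PySem.List.pySetD (pre ++ (x :: y :: r) ++ post) (pre.length : Int) y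
            = pre ++ y :: y :: (r ++ post) := by
          rw [show pre ++ (x :: y :: r) ++ post = pre ++ x :: (y :: r ++ post) from by simp]
          rw [pySetD_append_len]
          simp
        rw [hs1, pySetD_append_len1]
        have hidx : (pre.length : Int) + 1 + 1 = (((pre ++ [y, x]).length : Nat) : Int) := by
          simp; ring
        rw [hidx, show pre ++ y :: x :: (r ++ post) = (pre ++ [y, x]) ++ r ++ post from by simp]
        rw [ih r (pre ++ [y, x]) post true n (by push_cast at hn ⊢; simp at hn ⊢; omega)
            (by simp at hf ⊢; omega)]
        obtain ⟨hx, hy⟩ := hc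
        subst hx hy
        rw [show pstep ("B" :: "G" :: r) = "G" :: "B" :: pstep r from by simp [pstep],
            show hasBG ("B" :: "G" :: r) = true from by simp [hasBG]]
        simp
      · rw [if_neg (by rw [hg1, hg2]; exact hc)]
        have hidx : (pre.length : Int) + 1 = (((pre ++ [x]).length : Nat) : Int) := by
          simp
        rw [hidx, show pre ++ (x :: y :: r) ++ post = (pre ++ [x]) ++ (y :: r) ++ post from by simp]
        rw [ih (y :: r) (pre ++ [x]) post found n (by push_cast at hn ⊢; simp at hn ⊢; omega)
            (by simp at hf ⊢; omega)]
        rw [show pstep (x :: y :: r) = x :: pstep (y :: r) from by simp [pstep, hc],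
            show hasBG (x :: y :: r) = hasBG (y :: r) from by simp only [hasBG, if_neg hc]]
        simp

theorem loopB_corr (n : Int) (G2 : List Int) (hG2 : ∀ p ∈ G2, ¬ p < n) (f : Nat) :
    ∀ (u : List String) (walls : List Int),
    (u.length : Int) ≤ n →
    (∀ (j : Int), 0 ≤ j → j < (u.length : Int) → (j ∈ walls ↔ j ∈ (wallsV 0 u).map Prod.fst)) →
    loopB walls n f (girlsOf 0 u ++ G2) = girlsOf 0 (iterA f u) ++ G2 ∧
    wallsV 0 (iterA f u) = wallsV 0 u ∧ (iterA f u).length = u.length := by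
  induction f with
  | zero => intro u walls _ _; refine ⟨rfl, rfl, rfl⟩
  | succ f ih =>
    intro u walls hlen hw
    have hm := master walls n u 0 (-1) (by omega) (by omega)
      (by intro j hj1 hj2; exact hw j hj1 (by omega)) (by intro _; omega)
    simp only [loopB, stepB_eq_stepS, stepS_append walls n G2 hG2, hm]
    by_cases hb : hasBG u = true
    · rw [if_pos hb]
      have := ih (pstep u) walls (by rw [length_pstep]; exact hlen)
        (by intro j hj1 hj2; rw [length_pstep] at hj2; rw [wallsV_pstep]; exact hw j hj1 hj2)
      simp only [iterA, if_pos hb]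
      refine ⟨this.1, ?_, ?_⟩
      · rw [this.2.1, wallsV_pstep]
      · rw [this.2.2, length_pstep]
    · rw [if_neg (by simp_all)]
      have hit : iterA (f+1) u = pstep u := by simp [iterA, hb]
      rw [hit]
      exact ⟨rfl, wallsV_pstep _ _, length_pstep _⟩

theorem outerA_spec (f : Nat) : ∀ (u post : List String) (n : Int),
    n = (u.length : Int) → outerA n f (u ++ post) = iterA f u ++ post := by
  induction f with
  | zero => intro u post n _; rfl
  | succ f ih =>
    intro u post n hn
    have hinner := innerA_spec ((n-1).toNat) u [] post false n (by simpa using hn)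
      (by omega)
    simp only [List.nil_append, List.length_nil, Nat.cast_zero] at hinner
    simp only [outerA]
    rw [hinner]
    simp only [Bool.false_or]
    by_cases hb : hasBG u = true
    · rw [if_pos hb]
      rw [ih (pstep u) post n (by rw [length_pstep]; exact hn)]
      simp [iterA, hb]
    · rw [if_neg (by simp_all)]
      simp only [iterA]
      rw [if_neg hb]

theorem outerA_le_one (n : Int) (h : n ≤ 1) (f : Nat) (s : List String) :
    outerA n f s = s := by
  cases f with
  | zero => rfl
  | succ f =>
    simp only [outerA]
    rw [show (n-1).toNat = 0 from by omega]
    simp [innerA]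

theorem solve_main (s : List String) (n : Int) (t : Int)
    (h0 : 0 ≤ n) (h1 : n ≤ (s.length : Int)) :
    solve s n t = solve_alt s n t := by
  set u := List.take n.toNat s with hu_def
  set r := List.drop n.toNat s with hr_def
  have hs : s = u ++ r := (List.take_append_drop _ s).symm
  have hulen : (u.length : Int) = n := by
    rw [hu_def]; rw [List.length_take]; omega
  have hG2 : ∀ p ∈ girlsOf (0 + (u.length : Int)) r, ¬ p < n := by
    intro p hp hlt
    have := girlsOf_ge r (0 + (u.length : Int)) p hp
    omega
  have hw : ∀ (j : Int), 0 ≤ j → j < (u.length : Int) →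
      (j ∈ (wallsV 0 s).map Prod.fst ↔ j ∈ (wallsV 0 u).map Prod.fst) := by
    intro j hj1 hj2
    rw [hs, wallsV_append, List.map_append, List.mem_append]
    constructor
    · rintro (h | h)
      · exact h
      · exfalso
        rcases List.mem_map.1 h with ⟨p, hp, hfst⟩
        have := wallsV_ge _ _ _ hp
        omega
    · intro h; left; exact h
  have hc := loopB_corr n (girlsOf (0 + (u.length : Int)) r) hG2 t.toNat u
    ((wallsV 0 s).map Prod.fst) (by omega) hw
  have hgs : girlsOf 0 s = girlsOf 0 u ++ girlsOf (0 + (u.length : Int)) r := by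
    rw [hs, girlsOf_append]
  -- v is the final configuration
  set v := iterA t.toNat u ++ r with hv_def
  have hvlen : v.length = s.length := by
    rw [hv_def, hs]; simp [hc.2.2]
  have hvw : wallsV 0 v = wallsV 0 s := by
    rw [hv_def, hs, wallsV_append, wallsV_append, hc.2.1]
    congr 2
    rw [hc.2.2]
  have hvg : girlsOf 0 (iterA t.toNat u) ++ girlsOf (0 + (u.length : Int)) r = girlsOf 0 v := by
    rw [hv_def, girlsOf_append]
    congr 2
    rw [hc.2.2]
  unfold solve_alt
  simp only [build_spec']
  rw [hgs, hc.1, hvg, out_eq s v _ hvlen hvw rfl]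
  unfold solve
  rw [show s = u ++ r from hs, outerA_spec t.toNat u r n hulen.symm]

-- ===== VERDICT (by name: the statement is the Claim_ definition above) =====
theorem solve_spec : Claim_equal_solve := by
  intro s n t _ hpre
  unfold Spec_solve
  by_cases h0 : 0 ≤ n
  · by_cases h1 : n ≤ (s.length : Int)
    · exact solve_main s n t h0 h1
    · -- n > len(s): Pre gives t ≤ 0 or n ≤ 1
      rcases hpre with h | h | h
      · omega
      · -- t ≤ 0: no pass runs on either side
        have ht : t.toNat = 0 := by omega
        unfold solve_alt
        simp only [build_spec', ht]
        rw [show loopB ((wallsV 0 s).map Prod.fst) n 0 (girlsOf 0 s) = girlsOf 0 s from rfl]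
        rw [out_eq s s _ rfl rfl rfl]
        unfold solve
        rw [ht]
        rfl
      · -- n ≤ 1 and n > len(s) ≥ 0: s = []
        have hs : s = [] := by
          have : s.length = 0 := by omega
          simpa [List.length_eq_zero_iff] using this
        subst hs
        unfold solve
        rw [outerA_le_one n h]
        unfold solve_alt
        simp only [build_spec']
        rw [loopB_fix _ _ _ (by simp [girlsOf])]
        rw [out_eq [] [] _ rfl rfl rfl]
  · -- n < 0: A never enters the loop, and no girl position is < n
    unfold solve
    rw [outerA_le_one n (by omega)]
    unfold solve_alt
    simp only [build_spec']
    rw [loopB_fix _ _ _ (by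
      intro p hp hlt
      have := girlsOf_ge s 0 p hp
      omega)]
    rw [out_eq s s _ rfl rfl rfl]
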